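-- pv_equiv track=rewrite | github.com/Vakul18/LeetCode | TopInterviewMedium/Arrays/balanced_substring_vowels.py | longest_substring_equal_vowels_consonants
-- ===== SOURCE A (Python) =====
-- def longest_substring_equal_vowels_consonants(s: str) -> int:
--     # A set of vowels
--     vowels = set('aeiouAEIOU')
--
--     # Dictionary to store the first occurrence of a specific balance (difference between vowels and consonants)
--     seen = {0: -1}
--
--     max_len = 0
--     balance = 0  # Keeps track of the difference between vowels and consonants
--
--     for i, char in enumerate(s):
--         # If the character is a vowel, increase balance by 1
--         if char in vowels:
--             balance += 1
--         # If the character is a consonant, decrease balance by 1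
--         elif char.isalpha():  # Only consider alphabetic characters
--             balance -= 1
--
--         # If this balance has been seen before, calculate the length of the substring
--         if balance in seen:
--             max_len = max(max_len, i - seen[balance])
--         else:
--             # Store the first occurrence of this balance
--             seen[balance] = i
--
--     return max_len
-- ===== SOURCE B (Python) =====
-- def longest_substring_equal_vowels_consonants(s: str) -> int:
--     # Brute force over all start positions: for each start i walk the suffix once,
--     # keeping a running vowel-minus-consonant balance; whenever the balance returns
--     # to 0 the window s[i:i+j+1] is balanced and its length is a candidate.
--     vowels = "aeiouAEIOU"
--     max_len = 0
--     for i in range(len(s)):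
--         balance = 0
--         for j, ch in enumerate(s[i:]):
--             if ch in vowels:
--                 balance += 1
--             elif ch.isalpha():
--                 balance -= 1
--             if balance == 0:
--                 max_len = max(max_len, j + 1)
--     return max_len
-- ===== Notes on version B (the rewrite author's own statement) =====
-- stated objective: alternative
-- what changed: A's single linear pass with a hashmap of first occurrences of each prefix balance is replaced by an explicit O(n^2) brute force: for every start index rescan the suffix with a running balance and record each window whose balance returns to 0; no dictionary and no prefix-index bookkeeping at all.
import Mathlib
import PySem

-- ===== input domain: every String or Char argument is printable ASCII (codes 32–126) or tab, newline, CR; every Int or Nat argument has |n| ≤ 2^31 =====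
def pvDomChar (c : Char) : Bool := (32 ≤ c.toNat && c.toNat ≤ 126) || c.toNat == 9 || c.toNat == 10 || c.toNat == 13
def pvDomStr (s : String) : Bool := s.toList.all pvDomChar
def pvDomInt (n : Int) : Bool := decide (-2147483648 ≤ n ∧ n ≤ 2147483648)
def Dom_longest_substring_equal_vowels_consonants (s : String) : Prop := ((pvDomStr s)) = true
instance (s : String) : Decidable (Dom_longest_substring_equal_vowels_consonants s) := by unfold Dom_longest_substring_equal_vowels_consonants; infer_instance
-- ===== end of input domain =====

-- B replaces A's linear prefix-balance/hashmap pass by an explicit brute force over all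
-- start indices, rescanning each suffix with a running balance (objective: alternative,
-- O(n^2) instead of O(n), no dictionary at all).

-- ===== PORT A =====
-- Python: vowels = set('aeiouAEIOU'); seen = {0: -1}; one pass with enumerate, balance, dict of first occurrences.
def pvVowelsA : PySem.Set Char := PySem.Set.ofList "aeiouAEIOU".toList

def pvStepA (st : PySem.Dict Int Int × Int × Int) (p : Int × Char) :
    PySem.Dict Int Int × Int × Int :=
  let balance := if PySem.Set.contains pvVowelsA p.2 then st.2.2 + 1
    else if PySem.Chars.isalpha p.2 then st.2.2 - 1 else st.2.2
  if PySem.Dict.contains st.1 balance then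
    (st.1, max st.2.1 (p.1 - PySem.Dict.getD st.1 balance 0), balance)
  else
    (PySem.Dict.insert st.1 balance p.1, st.2.1, balance)

def longest_substring_equal_vowels_consonants (s : String) : Int :=
  ((PySem.List.enumerate s.toList 0).foldl pvStepA
    (PySem.Dict.ofList [((0 : Int), (-1 : Int))], (0 : Int), (0 : Int))).2.1

-- ===== PORT B =====
-- Python B: for i in range(len(s)): balance = 0; for j, ch in enumerate(s[i:]): update
-- balance, and on balance == 0 record max_len = max(max_len, j + 1).
def pvVowelsB : List Char := "aeiouAEIOU".toList

def pvInnerStep (st : Int × Int) (p : Int × Char) : Int × Int :=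
  let balance := if PySem.Chars.isIn [p.2] pvVowelsB then st.2 + 1
    else if PySem.Chars.isalpha p.2 then st.2 - 1 else st.2
  (if balance = 0 then max st.1 (p.1 + 1) else st.1, balance)

def longest_substring_equal_vowels_consonants_alt (s : String) : Int :=
  (PySem.List.pyRange 0 (s.toList.length : Int) 1).foldl
    (fun max_len i =>
      ((PySem.List.enumerate (PySem.List.slice s.toList (some i) none) 0).foldl
        pvInnerStep (max_len, 0)).1)
    0

-- ===== PRECONDITION & SPEC =====
def Spec_longest_substring_equal_vowels_consonants (s : String) (out : Int) : Prop := out = longest_substring_equal_vowels_consonants_alt s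
instance (s : String) (out : Int) : Decidable (Spec_longest_substring_equal_vowels_consonants s out) := by unfold Spec_longest_substring_equal_vowels_consonants; infer_instance

-- ===== CLAIM (what is proved, stated in full; the proofs are below) =====
def Claim_equal_longest_substring_equal_vowels_consonants : Prop := ∀ (s : String), Dom_longest_substring_equal_vowels_consonants s → Spec_longest_substring_equal_vowels_consonants s (longest_substring_equal_vowels_consonants s)

-- ===== LEMMAS AND PROOFS =====

-- the vowel/consonant weight of a character, and prefix balances
def pvDelta (c : Char) : Int :=
  if c ∈ pvVowelsB then 1 else if PySem.Chars.isalpha c then -1 else 0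

def pvS (p : List Char) : Int := (p.map pvDelta).sum

def pvQ (l : List Char) (k : Nat) : Int := ((l.take k).map pvDelta).sum

-- the common characterisation both programs satisfy: r is the maximum of 0 and
-- all lengths b - a of balanced substrings (equal prefix balance at a and b)
def pvGood (l : List Char) (r : Int) : Prop :=
  0 ≤ r ∧
  (∀ a b : Nat, a < b → b ≤ l.length → pvQ l a = pvQ l b → (b : Int) - (a : Int) ≤ r) ∧
  (r = 0 ∨ ∃ a b : Nat, a < b ∧ b ≤ l.length ∧ pvQ l a = pvQ l b ∧ r = (b : Int) - (a : Int))

lemma pvGood_unique {l : List Char} {r r' : Int} (h : pvGood l r) (h' : pvGood l r') :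
    r = r' := by
  obtain ⟨h0, hub, hat⟩ := h
  obtain ⟨h0', hub', hat'⟩ := h'
  have le1 : r ≤ r' := by
    rcases hat with rfl | ⟨a, b, hab, hb, hq, rfl⟩
    · exact h0'
    · exact hub' a b hab hb hq
  have le2 : r' ≤ r := by
    rcases hat' with rfl | ⟨a, b, hab, hb, hq, rfl⟩
    · exact h0
    · exact hub a b hab hb hq
  omega

lemma pvQ_append_le (p rest : List Char) (k : Nat) (h : k ≤ p.length) :
    pvQ (p ++ rest) k = pvQ p k := by
  unfold pvQ; rw [List.take_append_of_le_length h]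

lemma pvS_snoc (p : List Char) (c : Char) : pvS (p ++ [c]) = pvS p + pvDelta c := by
  simp [pvS]

lemma pvQ_snoc (p : List Char) (c : Char) :
    pvQ (p ++ [c]) (p.length + 1) = pvS p + pvDelta c := by
  unfold pvQ
  rw [List.take_of_length_le (by simp)]
  simp [pvS]

-- both ports' branch conditions are membership in pvVowelsB
lemma pvCondA (c : Char) : (PySem.Set.contains pvVowelsA c = true) ↔ c ∈ pvVowelsB := by
  have h : pvVowelsA = pvVowelsB := by decide
  rw [h]; simp [PySem.Set.contains, pvVowelsB]

lemma pvCondB (c : Char) : (PySem.Chars.isIn [c] pvVowelsB = true) ↔ c ∈ pvVowelsB := by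
  rw [PySem.Chars.isIn_iff_infix]; exact List.singleton_infix_iff c pvVowelsB

lemma pvStepA_balance (c : Char) (z : Int) :
    (if PySem.Set.contains pvVowelsA c then z + 1
     else if PySem.Chars.isalpha c then z - 1 else z) = z + pvDelta c := by
  by_cases hc : c ∈ pvVowelsB
  · rw [if_pos ((pvCondA c).2 hc)]; unfold pvDelta; rw [if_pos hc]
  · rw [if_neg (fun h => hc ((pvCondA c).1 h))]
    unfold pvDelta; rw [if_neg hc]
    by_cases ha : PySem.Chars.isalpha c = true
    · rw [if_pos ha, if_pos ha]; ring
    · rw [if_neg ha, if_neg ha]; ring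

lemma pvStepB_balance (c : Char) (z : Int) :
    (if PySem.Chars.isIn [c] pvVowelsB then z + 1
     else if PySem.Chars.isalpha c then z - 1 else z) = z + pvDelta c := by
  by_cases hc : c ∈ pvVowelsB
  · rw [if_pos ((pvCondB c).2 hc)]; unfold pvDelta; rw [if_pos hc]
  · rw [if_neg (fun h => hc ((pvCondB c).1 h))]
    unfold pvDelta; rw [if_neg hc]
    by_cases ha : PySem.Chars.isalpha c = true
    · rw [if_pos ha, if_pos ha]; ring
    · rw [if_neg ha, if_neg ha]; ring

-- ---------- side A ----------

-- k is the first prefix of pre with balance v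
def pvFirstAt (pre : List Char) (k : Nat) (v : Int) : Prop :=
  k ≤ pre.length ∧ pvQ pre k = v ∧ ∀ k' < k, pvQ pre k' ≠ v

def pvInvA (pre : List Char) (st : PySem.Dict Int Int × Int × Int) : Prop :=
  st.2.2 = pvS pre ∧
  (∀ v : Int, (∃ k, k ≤ pre.length ∧ pvQ pre k = v) →
      ∃ k, pvFirstAt pre k v ∧ st.1.get? v = some ((k : Int) - 1)) ∧
  (∀ v : Int, (∀ k ≤ pre.length, pvQ pre k ≠ v) → st.1.get? v = none) ∧
  pvGood pre st.2.1

lemma pvInvA_init :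
    pvInvA [] (PySem.Dict.ofList [((0 : Int), (-1 : Int))], (0 : Int), (0 : Int)) := by
  refine ⟨rfl, ?_, ?_, le_refl _, ?_, Or.inl rfl⟩
  · intro v ⟨k, hk, hq⟩
    have hk0 : k = 0 := Nat.le_zero.1 hk
    subst hk0
    refine ⟨0, ⟨Nat.le_refl 0, hq, by omega⟩, ?_⟩
    rw [← hq]; decide
  · intro v hv
    have hne : v ≠ 0 := fun h => hv 0 (Nat.le_refl 0) (h ▸ rfl)
    rw [show PySem.Dict.ofList [((0 : Int), (-1 : Int))] = PySem.Dict.empty.insert 0 (-1) from rfl,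
        PySem.Dict.get?_insert]
    simp [hne, PySem.Dict.get?_empty]
  · intro a b hab hb; simp at hb; omega

lemma pvInvA_step (pre : List Char) (c : Char) (st : PySem.Dict Int Int × Int × Int)
    (h : pvInvA pre st) :
    pvInvA (pre ++ [c]) (pvStepA st ((pre.length : Int), c)) := by
  obtain ⟨hbal, hfwd, hnone, hg0, hgub, hgat⟩ := h
  have hm : (pre ++ [c]).length = pre.length + 1 := by simp
  -- the new balance
  have hb : (if PySem.Set.contains pvVowelsA c then st.2.2 + 1
      else if PySem.Chars.isalpha c then st.2.2 - 1 else st.2.2) = pvS pre + pvDelta c := by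
    rw [pvStepA_balance, hbal]
  unfold pvStepA
  simp only [hb]
  have hQtop : pvQ (pre ++ [c]) (pre.length + 1) = pvS pre + pvDelta c := pvQ_snoc pre c
  rcases hqv : st.1.get? (pvS pre + pvDelta c) with _ | w
  · -- fresh balance: insert
    have hcont : st.1.contains (pvS pre + pvDelta c) = false := by
      rw [PySem.Dict.contains_eq_isSome_get?, hqv]; rfl
    rw [if_neg (by simp [hcont])]
    have hfresh : ∀ k ≤ pre.length, pvQ pre k ≠ pvS pre + pvDelta c := by
      intro k hk hq
      obtain ⟨k₀, _, hsome⟩ := hfwd _ ⟨k, hk, hq⟩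
      rw [hqv] at hsome; simp at hsome
    refine ⟨by rw [pvS_snoc], ?_, ?_, hg0, ?_, ?_⟩
    · -- forward
      intro v ⟨k, hk, hq⟩
      by_cases hv : v = pvS pre + pvDelta c
      · subst hv
        refine ⟨pre.length + 1, ⟨by omega, hQtop, ?_⟩, ?_⟩
        · intro k' hk' hq'
          rw [pvQ_append_le pre [c] k' (by omega)] at hq'
          exact hfresh k' (by omega) hq'
        · have hcast : ((pre.length + 1 : Nat) : Int) - 1 = (pre.length : Int) := by
            push_cast; ring
          rw [PySem.Dict.get?_insert, if_pos rfl, hcast]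
      · have hk' : k ≤ pre.length := by
          rcases Nat.lt_or_ge k (pre.length + 1) with hlt | hge
          · omega
          · exfalso
            have : k = pre.length + 1 := by rw [hm] at hk; omega
            subst this; rw [hQtop] at hq; exact hv hq.symm
        rw [pvQ_append_le pre [c] k hk'] at hq
        obtain ⟨k₀, ⟨hk₀le, hk₀q, hk₀min⟩, hsome⟩ := hfwd v ⟨k, hk', hq⟩
        refine ⟨k₀, ⟨by omega, ?_, ?_⟩, ?_⟩
        · rw [pvQ_append_le pre [c] k₀ hk₀le]; exact hk₀q
        · intro j hj hqj
          rw [pvQ_append_le pre [c] j (by omega)] at hqj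
          exact hk₀min j hj hqj
        · rw [PySem.Dict.get?_insert, if_neg hv]; exact hsome
    · -- none
      intro v hv
      have hvne : v ≠ pvS pre + pvDelta c := by
        intro hveq
        exact hv (pre.length + 1) (by omega) (by rw [hQtop, hveq])
      rw [PySem.Dict.get?_insert, if_neg hvne]
      refine hnone v ?_
      intro k hk hq
      exact hv k (by omega) (by rw [pvQ_append_le pre [c] k hk]; exact hq)
    · -- bound, unchanged max
      intro a b hab hb hq
      rw [hm] at hb
      rcases Nat.lt_or_ge b (pre.length + 1) with hblt | hbge
      · rw [pvQ_append_le pre [c] a (by omega), pvQ_append_le pre [c] b (by omega)] at hq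
        exact hgub a b hab (by omega) hq
      · have hbeq : b = pre.length + 1 := by omega
        subst hbeq
        rw [hQtop, pvQ_append_le pre [c] a (by omega)] at hq
        exact absurd hq (hfresh a (by omega))
    · -- attainment, unchanged max
      rcases hgat with heq | ⟨a, b, hab, hb, hq, heq⟩
      · exact Or.inl heq
      · exact Or.inr ⟨a, b, hab, by omega,
          by rw [pvQ_append_le pre [c] a (by omega), pvQ_append_le pre [c] b hb]; exact hq, heq⟩
  · -- balance seen before
    have hcont : st.1.contains (pvS pre + pvDelta c) = true := by
      rw [PySem.Dict.contains_eq_isSome_get?, hqv]; rfl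
    rw [if_pos (by simp [hcont])]
    have hex : ∃ k, k ≤ pre.length ∧ pvQ pre k = pvS pre + pvDelta c := by
      by_contra hno
      push Not at hno
      have := hnone _ (fun k hk => hno k hk)
      rw [hqv] at this; simp at this
    obtain ⟨k₀, ⟨hk₀le, hk₀q, hk₀min⟩, hsome⟩ := hfwd _ hex
    have hw : w = (k₀ : Int) - 1 := by
      rw [hqv] at hsome; exact Option.some.inj hsome
    have hgetD : st.1.getD (pvS pre + pvDelta c) 0 = (k₀ : Int) - 1 := by
      rw [PySem.Dict.getD_eq_get?_getD, hqv, hw]; rfl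
    rw [hgetD]
    have hcand : (pre.length : Int) - ((k₀ : Int) - 1) = ((pre.length : Int) + 1) - k₀ := by ring
    refine ⟨by rw [pvS_snoc], ?_, ?_, ?_, ?_, ?_⟩
    · -- forward, seen unchanged
      intro v ⟨k, hk, hq⟩
      by_cases hv : v = pvS pre + pvDelta c
      · subst hv
        refine ⟨k₀, ⟨by omega, ?_, ?_⟩, hsome⟩
        · rw [pvQ_append_le pre [c] k₀ hk₀le]; exact hk₀q
        · intro j hj hqj
          rw [pvQ_append_le pre [c] j (by omega)] at hqj
          exact hk₀min j hj hqj
      · have hk' : k ≤ pre.length := by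
          rcases Nat.lt_or_ge k (pre.length + 1) with hlt | hge
          · omega
          · exfalso
            have : k = pre.length + 1 := by rw [hm] at hk; omega
            subst this; rw [hQtop] at hq; exact hv hq.symm
        rw [pvQ_append_le pre [c] k hk'] at hq
        obtain ⟨j₀, ⟨hj₀le, hj₀q, hj₀min⟩, hjsome⟩ := hfwd v ⟨k, hk', hq⟩
        refine ⟨j₀, ⟨by omega, ?_, ?_⟩, hjsome⟩
        · rw [pvQ_append_le pre [c] j₀ hj₀le]; exact hj₀q
        · intro j hj hqj
          rw [pvQ_append_le pre [c] j (by omega)] at hqj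
          exact hj₀min j hj hqj
    · -- none, seen unchanged
      intro v hv
      refine hnone v ?_
      intro k hk hq
      exact hv k (by omega) (by rw [pvQ_append_le pre [c] k hk]; exact hq)
    · -- 0 ≤ new max
      exact le_trans hg0 (le_max_left _ _)
    · -- bound
      intro a b hab hb hq
      rw [hm] at hb
      rcases Nat.lt_or_ge b (pre.length + 1) with hblt | hbge
      · rw [pvQ_append_le pre [c] a (by omega), pvQ_append_le pre [c] b (by omega)] at hq
        exact le_trans (hgub a b hab (by omega) hq) (le_max_left _ _)
      · have hbeq : b = pre.length + 1 := by omega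
        subst hbeq
        rw [hQtop, pvQ_append_le pre [c] a (by omega)] at hq
        have hk₀a : k₀ ≤ a := by
          by_contra hlt
          exact hk₀min a (by omega) hq
        refine le_trans ?_ (le_max_right _ _)
        rw [hcand]; push_cast; omega
    · -- attainment
      rcases le_total ((pre.length : Int) - ((k₀ : Int) - 1)) st.2.1 with hle | hle
      · rw [max_eq_left hle]
        rcases hgat with heq | ⟨a, b, hab, hb, hq, heq⟩
        · exact Or.inl heq
        · exact Or.inr ⟨a, b, hab, by omega,
            by rw [pvQ_append_le pre [c] a (by omega), pvQ_append_le pre [c] b hb]; exact hq, heq⟩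
      · rw [max_eq_right hle]
        refine Or.inr ⟨k₀, pre.length + 1, by omega, by omega, ?_, ?_⟩
        · rw [pvQ_append_le pre [c] k₀ hk₀le, hQtop]; exact hk₀q
        · rw [hcand]; push_cast; ring

lemma pvFoldA (rest : List Char) (pre : List Char) (st : PySem.Dict Int Int × Int × Int)
    (h : pvInvA pre st) :
    pvInvA (pre ++ rest) ((PySem.List.enumerate rest (pre.length : Int)).foldl pvStepA st) := by
  induction rest generalizing pre st with
  | nil => simpa using h
  | cons c rest ih =>
    rw [PySem.List.enumerate_cons, List.foldl_cons]
    have h' := pvInvA_step pre c st h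
    have hlen : ((pre ++ [c]).length : Int) = (pre.length : Int) + 1 := by simp
    have := ih (pre ++ [c]) (pvStepA st ((pre.length : Int), c)) h'
    rw [hlen] at this
    simpa using this

lemma pvGoodA (s : String) :
    pvGood s.toList (longest_substring_equal_vowels_consonants s) := by
  have h := pvFoldA s.toList [] _ pvInvA_init
  simp only [List.nil_append, List.length_nil, Nat.cast_zero] at h
  exact h.2.2.2

-- ---------- side B ----------

-- inner loop: over a suffix t, starting max m0, the result is the max of m0 and
-- every nonempty balanced prefix length of t
def pvInvInner (p : List Char) (m0 : Int) (st : Int × Int) : Prop :=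
  st.2 = pvS p ∧ m0 ≤ st.1 ∧
  (∀ k : Nat, 0 < k → k ≤ p.length → pvS (p.take k) = 0 → (k : Int) ≤ st.1) ∧
  (st.1 = m0 ∨ ∃ k : Nat, 0 < k ∧ k ≤ p.length ∧ pvS (p.take k) = 0 ∧ st.1 = (k : Int))

lemma pvTake_snoc_le (p : List Char) (c : Char) (k : Nat) (h : k ≤ p.length) :
    (p ++ [c]).take k = p.take k := List.take_append_of_le_length h

lemma pvInvInner_step (p : List Char) (c : Char) (m0 : Int) (st : Int × Int)
    (h : pvInvInner p m0 st) :
    pvInvInner (p ++ [c]) m0 (pvInnerStep st ((p.length : Int), c)) := by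
  obtain ⟨hbal, hm0, hub, hat⟩ := h
  have hm : (p ++ [c]).length = p.length + 1 := by simp
  have hb : (if PySem.Chars.isIn [c] pvVowelsB then st.2 + 1
      else if PySem.Chars.isalpha c then st.2 - 1 else st.2) = pvS p + pvDelta c := by
    rw [pvStepB_balance, hbal]
  unfold pvInnerStep
  simp only [hb]
  have htop : pvS ((p ++ [c]).take (p.length + 1)) = pvS p + pvDelta c := by
    rw [List.take_of_length_le (by simp), pvS_snoc]
  by_cases hz : pvS p + pvDelta c = 0
  · rw [if_pos hz]
    refine ⟨by rw [pvS_snoc], le_trans hm0 (le_max_left _ _), ?_, ?_⟩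
    · intro k hk0 hk hsk
      rcases Nat.lt_or_ge k (p.length + 1) with hlt | hge
      · rw [pvTake_snoc_le p c k (by omega)] at hsk
        exact le_trans (hub k hk0 (by omega) hsk) (le_max_left _ _)
      · have : k = p.length + 1 := by rw [hm] at hk; omega
        subst this
        refine le_trans (le_of_eq ?_) (le_max_right _ _)
        push_cast; ring
    · rcases le_total st.1 ((p.length : Int) + 1) with hle | hle
      · rw [max_eq_right hle]
        exact Or.inr ⟨p.length + 1, by omega, by omega, by rw [htop]; exact hz,
          by push_cast; ring⟩
      · rw [max_eq_left hle]
        rcases hat with heq | ⟨k, hk0, hk, hsk, heq⟩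
        · exact Or.inl heq
        · exact Or.inr ⟨k, hk0, by omega,
            by rw [pvTake_snoc_le p c k hk]; exact hsk, heq⟩
  · rw [if_neg hz]
    refine ⟨by rw [pvS_snoc], hm0, ?_, ?_⟩
    · intro k hk0 hk hsk
      rcases Nat.lt_or_ge k (p.length + 1) with hlt | hge
      · rw [pvTake_snoc_le p c k (by omega)] at hsk
        exact hub k hk0 (by omega) hsk
      · have : k = p.length + 1 := by rw [hm] at hk; omega
        subst this
        rw [htop] at hsk
        exact absurd hsk hz
    · rcases hat with heq | ⟨k, hk0, hk, hsk, heq⟩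
      · exact Or.inl heq
      · exact Or.inr ⟨k, hk0, by omega,
          by rw [pvTake_snoc_le p c k hk]; exact hsk, heq⟩

lemma pvFoldInner (rest p : List Char) (m0 : Int) (st : Int × Int)
    (h : pvInvInner p m0 st) :
    pvInvInner (p ++ rest) m0
      ((PySem.List.enumerate rest (p.length : Int)).foldl pvInnerStep st) := by
  induction rest generalizing p st with
  | nil => simpa using h
  | cons c rest ih =>
    rw [PySem.List.enumerate_cons, List.foldl_cons]
    have h' := pvInvInner_step p c m0 st h
    have hlen : ((p ++ [c]).length : Int) = (p.length : Int) + 1 := by simp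
    have := ih (p ++ [c]) (pvInnerStep st ((p.length : Int), c)) h'
    rw [hlen] at this
    simpa using this

lemma pvInner_spec (t : List Char) (m0 : Int) :
    pvInvInner t m0 ((PySem.List.enumerate t 0).foldl pvInnerStep (m0, 0)) := by
  have h0 : pvInvInner [] m0 (m0, 0) := by
    refine ⟨rfl, le_refl _, ?_, Or.inl rfl⟩
    intro k hk0 hk; simp at hk; omega
  have h := pvFoldInner t [] m0 (m0, 0) h0
  simpa using h

-- balance of a window in terms of prefix balances
lemma pvS_drop_take (l : List Char) (a k : Nat) :
    pvS ((l.drop a).take k) = pvQ l (a + k) - pvQ l a := by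
  unfold pvQ
  rw [List.take_add]
  simp [pvS]

-- outer loop invariant, by induction on how many start indices were processed
def pvInvOuter (l : List Char) (c : Nat) (m : Int) : Prop :=
  0 ≤ m ∧
  (∀ a b : Nat, a < c → a < b → b ≤ l.length → pvQ l a = pvQ l b → (b : Int) - (a : Int) ≤ m) ∧
  (m = 0 ∨ ∃ a b : Nat, a < b ∧ b ≤ l.length ∧ pvQ l a = pvQ l b ∧ m = (b : Int) - (a : Int))

lemma pvOuter_step (l : List Char) (c : Nat) (m : Int) (hc : c < l.length)
    (h : pvInvOuter l c m) :
    pvInvOuter l (c + 1)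
      ((PySem.List.enumerate (PySem.List.slice l (some (c : Int)) none) 0).foldl
        pvInnerStep (m, 0)).1 := by
  obtain ⟨h0, hub, hat⟩ := h
  rw [PySem.List.slice_from_natCast]
  obtain ⟨_, hm0, hinub, hinat⟩ := pvInner_spec (l.drop c) m
  set r := ((PySem.List.enumerate (l.drop c) 0).foldl pvInnerStep (m, 0)).1 with hr
  have hdlen : (l.drop c).length = l.length - c := by simp
  refine ⟨le_trans h0 hm0, ?_, ?_⟩
  · intro a b ha hab hb hq
    rcases Nat.lt_or_ge a c with hac | hac
    · exact le_trans (hub a b hac hab hb hq) hm0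
    · have hae : a = c := by omega
      subst hae
      have hk : pvS ((l.drop a).take (b - a)) = 0 := by
        rw [pvS_drop_take]
        have : a + (b - a) = b := by omega
        rw [this, hq]; ring
      have := hinub (b - a) (by omega) (by omega) hk
      push_cast at this ⊢
      omega
  · rcases hinat with heq | ⟨k, hk0, hk, hsk, heq⟩
    · rw [heq]; exact hat
    · rw [pvS_drop_take] at hsk
      refine Or.inr ⟨c, c + k, by omega, by rw [hdlen] at hk; omega, by omega, ?_⟩
      rw [heq]; push_cast; ring

lemma pvOuter_fold (l : List Char) (c : Nat) (hc : c ≤ l.length) :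
    pvInvOuter l c
      ((PySem.List.pyRange 0 (c : Int) 1).foldl
        (fun max_len i =>
          ((PySem.List.enumerate (PySem.List.slice l (some i) none) 0).foldl
            pvInnerStep (max_len, 0)).1)
        0) := by
  induction c with
  | zero =>
    refine ⟨le_refl _, ?_, Or.inl ?_⟩
    · intro a b ha; omega
    · simp
  | succ c ih =>
    have hc' : c ≤ l.length := by omega
    have hrange : PySem.List.pyRange 0 ((c : Int) + 1) 1
        = PySem.List.pyRange 0 (c : Int) 1 ++ [(c : Int)] :=
      PySem.List.pyRange_one_succ_right (by omega)
    have hcast : ((c + 1 : Nat) : Int) = (c : Int) + 1 := by push_cast; ring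
    rw [hcast, hrange, List.foldl_append, List.foldl_cons, List.foldl_nil]
    exact pvOuter_step l c _ (by omega) (ih hc')

lemma pvGoodB (s : String) :
    pvGood s.toList (longest_substring_equal_vowels_consonants_alt s) := by
  have h := pvOuter_fold s.toList s.toList.length (le_refl _)
  obtain ⟨h0, hub, hat⟩ := h
  refine ⟨h0, ?_, hat⟩
  intro a b hab hb hq
  exact hub a b (by omega) hab hb hq

-- ===== VERDICT (by name: the statement is the Claim_ definition above) =====
theorem longest_substring_equal_vowels_consonants_spec : Claim_equal_longest_substring_equal_vowels_consonants := by
  intro s _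
  unfold Spec_longest_substring_equal_vowels_consonants
  exact pvGood_unique (pvGoodA s) (pvGoodB s)
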